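-- pv_equiv track=rewrite | github.com/rcarlsson/adventofcode | 2017/10/aoc_10a.py | solve_line
-- ===== SOURCE A (Python) =====
-- def solve_line(string_length, line):
--     lengths = list(map(int, line.split(',')))
--     idx = 0
--     skip_length = 0
--     string_list = list(range(string_length))
--
--     for value in lengths:
--         if idx+value > string_length:
--             sub_string = string_list[idx:] + string_list[:idx+value-string_length]
--             sub_string.reverse()
--             string_list[idx:] = sub_string[:string_length-idx]
--             string_list[0:idx+value-string_length] = sub_string[string_length-idx:]
--         else:
--             sub_string = string_list[idx:idx+value]
--             sub_string.reverse()
--             string_list[idx:idx+value] = sub_string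
--
--         idx = (idx+value+skip_length) % string_length
--         skip_length += 1
--
--     return string_list[0]*string_list[1]
-- ===== SOURCE B (Python) =====
-- def solve_line(string_length, line):
--     lengths = [int(x) for x in line.split(',')]
--     # Keep the list rotated so that the current position is always index 0:
--     # reverse a prefix, then rotate left past the reversed segment plus skip.
--     rot = list(range(string_length))
--     offset = 0
--     skip = 0
--     for value in lengths:
--         rot = rot[:value][::-1] + rot[value:]
--         shift = (value + skip) % string_length
--         rot = rot[shift:] + rot[:shift]
--         offset = (offset + shift) % string_length
--         skip += 1
--     return rot[(string_length - offset) % string_length] * rot[(string_length - offset + 1) % string_length]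
-- ===== Notes on version B (the rewrite author's own statement) =====
-- stated objective: simpler
-- what changed: A's two wrap/non-wrap slice-concatenate-reverse-resplice branches are replaced by keeping the list rotated so the current position is always index 0: each length becomes one uniform prefix reversal plus a left rotation, and the answer is read off through the tracked offset at the end.
-- outside the precondition, e.g. on solve_line(3, '4,0'): A returns 0, B returns 2; on solve_line(4, '-1,-2'): A returns 2, B returns 3
import Mathlib
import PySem

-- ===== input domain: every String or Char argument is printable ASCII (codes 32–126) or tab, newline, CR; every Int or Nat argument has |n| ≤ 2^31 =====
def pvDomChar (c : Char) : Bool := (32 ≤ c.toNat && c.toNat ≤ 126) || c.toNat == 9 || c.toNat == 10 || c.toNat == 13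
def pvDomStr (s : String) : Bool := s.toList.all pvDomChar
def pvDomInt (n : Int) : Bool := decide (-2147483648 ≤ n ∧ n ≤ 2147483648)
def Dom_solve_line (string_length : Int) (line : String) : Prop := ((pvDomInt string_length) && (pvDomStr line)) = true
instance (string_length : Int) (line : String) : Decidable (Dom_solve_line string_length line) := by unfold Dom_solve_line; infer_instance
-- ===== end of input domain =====

-- B replaces A's two slice-concatenate-reverse-resplice branches by keeping the list rotated so the
-- current position is always index 0: one uniform prefix reversal plus a rotation per length (simpler, same cost).
-- Equivalence is about the return value only (A mutates only a local list, nothing the caller sees).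

-- ===== PORT A =====
-- loop body of A, extracted as a helper: state = (string_list, idx, skip_length)
def stepA (n : Int) (st : List Int × Int × Int) (value : Int) : List Int × Int × Int :=
  let sl := st.1
  let idx := st.2.1
  let skip := st.2.2
  let sl' :=
    if idx + value > n then
      let sub := (PySem.List.slice sl (some idx) none ++ PySem.List.slice sl none (some (idx + value - n))).reverse
      let sl1 := PySem.List.slice sl none (some idx) ++ PySem.List.slice sub none (some (n - idx))
      PySem.List.slice sub (some (n - idx)) none ++ PySem.List.slice sl1 (some (idx + value - n)) none
    else
      let sub := (PySem.List.slice sl (some idx) (some (idx + value))).reverse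
      PySem.List.slice sl none (some idx) ++ sub ++ PySem.List.slice sl (some (idx + value)) none
  (sl', PySem.Int.mod (idx + value + skip) n, skip + 1)

def solve_line (string_length : Int) (line : String) : Int :=
  let lengths := ((PySem.Str.split? line ",").getD []).map (fun t => (PySem.Int.ofStr? t).getD 0)
  let st := lengths.foldl (stepA string_length) (PySem.List.pyRange 0 string_length 1, 0, 0)
  PySem.List.pyGetD st.1 0 0 * PySem.List.pyGetD st.1 1 0

-- ===== PORT B =====
-- loop body of B: state = (rot, offset, skip); rot is the string list rotated left by offset
def stepB (n : Int) (st : List Int × Int × Int) (value : Int) : List Int × Int × Int :=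
  let rot := st.1
  let offset := st.2.1
  let skip := st.2.2
  let rot1 := (PySem.List.slice rot none (some value)).reverse ++ PySem.List.slice rot (some value) none
  let shift := PySem.Int.mod (value + skip) n
  let rot2 := PySem.List.slice rot1 (some shift) none ++ PySem.List.slice rot1 none (some shift)
  (rot2, PySem.Int.mod (offset + shift) n, skip + 1)

def solve_line_alt (string_length : Int) (line : String) : Int :=
  let lengths := ((PySem.Str.split? line ",").getD []).map (fun t => (PySem.Int.ofStr? t).getD 0)
  let st := lengths.foldl (stepB string_length) (PySem.List.pyRange 0 string_length 1, 0, 0)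
  PySem.List.pyGetD st.1 (PySem.Int.mod (string_length - st.2.1) string_length) 0 *
    PySem.List.pyGetD st.1 (PySem.Int.mod (string_length - st.2.1 + 1) string_length) 0

-- ===== PRECONDITION & SPEC =====
-- Pre_ excludes (a) inputs where A raises (string_length < 2: IndexError/ZeroDivisionError; tokens that are
-- not integers: ValueError) and (b) lines whose parsed lengths fall outside [0, string_length]: the knot-hash
-- task never supplies such lengths, and there A's slice-clamping value and B's rotation value are two equally
-- accidental answers.
def Pre_solve_line (string_length : Int) (line : String) : Prop :=
  2 ≤ string_length ∧
    ∀ t ∈ (PySem.Str.split? line ",").getD [],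
      (PySem.Int.ofStr? t).isSome = true ∧ 0 ≤ (PySem.Int.ofStr? t).getD 0 ∧
        (PySem.Int.ofStr? t).getD 0 ≤ string_length

instance (string_length : Int) (line : String) : Decidable (Pre_solve_line string_length line) := by
  unfold Pre_solve_line; infer_instance

def pvWitness_solve_line : Int × String := (5, "3,1,4")

def Spec_solve_line (string_length : Int) (line : String) (out : Int) : Prop := out = solve_line_alt string_length line
instance (string_length : Int) (line : String) (out : Int) : Decidable (Spec_solve_line string_length line out) := by unfold Spec_solve_line; infer_instance

-- ===== CLAIM (what is proved, stated in full; the proofs are below) =====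
def Claim_equal_solve_line : Prop := ∀ (string_length : Int) (line : String), Dom_solve_line string_length line → Pre_solve_line string_length line → Spec_solve_line string_length line (solve_line string_length line)

-- ===== LEMMAS AND PROOFS =====

-- the coupling invariant: B's list is A's list rotated left by A's idx
def KnotInv (n : Int) (stA stB : List Int × Int × Int) : Prop :=
  stA.1.length = n.toNat ∧ 0 ≤ stA.2.1 ∧ stA.2.1 < n ∧
    stB.1 = stA.1.rotate stA.2.1.toNat ∧ stB.2.1 = stA.2.1 ∧ stB.2.2 = stA.2.2

-- non-wrapping reversal: A's new list rotated = B's reversal of the rotated list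
theorem rot_step_small {α : Type} (P M S : List α) :
    (P ++ M.reverse ++ S).drop P.length ++ (P ++ M.reverse ++ S).take P.length
      = ((M ++ S ++ P).take M.length).reverse ++ (M ++ S ++ P).drop M.length := by
  simp [List.append_assoc]

-- wrapping reversal, abstract core
theorem wrap_aux {α : Type} (X Y Q2 : List α) :
    (X ++ (Q2 ++ Y)).drop (X.length + Q2.length) ++ (X ++ (Q2 ++ Y)).take (X.length + Q2.length) = (Y ++ X) ++ Q2 := by
  simp [List.drop_append, List.take_append,
    List.drop_eq_nil_of_le (by omega : X.length ≤ X.length + Q2.length),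
    List.take_of_length_le (by omega : X.length ≤ X.length + Q2.length)]

-- modular arithmetic of the index updates: adding the shift modulo n commutes with the outer mod
theorem emod_add_emod_right (a b n : Int) : (a + b % n) % n = (a + b) % n := by
  conv_rhs => rw [Int.add_emod]
  rw [Int.add_emod a (b % n), Int.emod_emod_of_dvd _ dvd_rfl]

theorem step_inv (n v : Int) (hn : 2 ≤ n) (hv0 : 0 ≤ v) (hvn : v ≤ n)
    (stA stB : List Int × Int × Int) (h : KnotInv n stA stB) :
    KnotInv n (stepA n stA v) (stepB n stB v) := by
  obtain ⟨L, idx, skip⟩ := stA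
  obtain ⟨rot, off, skB⟩ := stB
  obtain ⟨hlen, hi0, hin, hrot, hoff, hskip⟩ := h
  dsimp only at hlen hi0 hin hrot hoff hskip
  subst hrot
  replace hoff := hoff.symm; subst hoff
  replace hskip := hskip.symm; subst hskip
  have hn0 : (0:Int) < n := by omega
  have hNn : ((n.toNat : Int)) = n := Int.toNat_of_nonneg (by omega)
  have hidx : ((idx.toNat : Int)) = idx := Int.toNat_of_nonneg hi0
  have hvt : ((v.toNat : Int)) = v := Int.toNat_of_nonneg hv0
  have hiN : idx.toNat < n.toNat := by omega
  have hiL : idx.toNat ≤ L.length := by omega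
  have hs0 : 0 ≤ PySem.Int.mod (v + skip) n := PySem.Int.mod_nonneg _ hn0
  have hsn : PySem.Int.mod (v + skip) n < n := PySem.Int.mod_lt _ hn0
  have hsInt : (((PySem.Int.mod (v + skip) n).toNat : Int)) = PySem.Int.mod (v + skip) n :=
    Int.toNat_of_nonneg hs0
  -- the common shape of the two branches of A's loop body
  have main : ∃ E : List Int,
      (if idx + v > n then
        (PySem.List.slice ((PySem.List.slice L (some idx) none ++ PySem.List.slice L none (some (idx + v - n))).reverse) (some (n - idx)) none ++
          PySem.List.slice (PySem.List.slice L none (some idx) ++ PySem.List.slice ((PySem.List.slice L (some idx) none ++ PySem.List.slice L none (some (idx + v - n))).reverse) none (some (n - idx))) (some (idx + v - n)) none)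
      else
        (PySem.List.slice L none (some idx) ++ (PySem.List.slice L (some idx) (some (idx + v))).reverse ++ PySem.List.slice L (some (idx + v)) none)) = E
      ∧ E.length = n.toNat
      ∧ ((L.rotate idx.toNat).take v.toNat).reverse ++ (L.rotate idx.toNat).drop v.toNat = E.rotate idx.toNat := by
    by_cases hc : idx + v > n
    · -- wrapping branch of A
      rw [if_pos hc]
      rw [PySem.List.slice_from _ hi0, PySem.List.slice_to _ (by omega : (0:Int) ≤ idx + v - n),
        PySem.List.slice_to _ hi0, PySem.List.slice_to _ (by omega : (0:Int) ≤ n - idx),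
        PySem.List.slice_from _ (by omega : (0:Int) ≤ n - idx),
        PySem.List.slice_from _ (by omega : (0:Int) ≤ idx + v - n)]
      have hkL : (idx + v - n).toNat ≤ L.length := by omega
      have hki : (idx + v - n).toNat ≤ idx.toNat := by omega
      have hQ1len : (L.take (idx + v - n).toNat).length = (idx + v - n).toNat :=
        List.length_take_of_le hkL
      have hsplit : (L.take idx.toNat).take (idx + v - n).toNat = L.take (idx + v - n).toNat := by
        rw [List.take_take, min_eq_left hki]
      have htk : L.take idx.toNat
          = L.take (idx + v - n).toNat ++ (L.take idx.toNat).drop (idx + v - n).toNat := by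
        conv_lhs => rw [← List.take_append_drop (idx + v - n).toNat (L.take idx.toNat)]
        rw [hsplit]
      have hdropk : (L.take idx.toNat ++ ((L.drop idx.toNat ++ L.take (idx + v - n).toNat).reverse).take (n - idx).toNat).drop (idx + v - n).toNat
          = (L.take idx.toNat).drop (idx + v - n).toNat ++ ((L.drop idx.toNat ++ L.take (idx + v - n).toNat).reverse).take (n - idx).toNat := by
        conv_lhs => rw [htk, List.append_assoc]
        exact List.drop_left' hQ1len
      rw [hdropk]
      have hsublen : ((L.drop idx.toNat ++ L.take (idx + v - n).toNat).reverse).length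
          = (L.length - idx.toNat) + (idx + v - n).toNat := by
        simp [hQ1len]
        omega
      refine ⟨_, rfl, ?_, ?_⟩
      · simp [hQ1len, List.length_take_of_le hiL]
        omega
      · have hLHS : ((L.rotate idx.toNat).take v.toNat).reverse ++ (L.rotate idx.toNat).drop v.toNat
            = (L.drop idx.toNat ++ L.take (idx + v - n).toNat).reverse ++ (L.take idx.toNat).drop (idx + v - n).toNat := by
          rw [List.rotate_eq_drop_append_take hiL]
          conv_lhs => rw [htk]
          rw [List.take_append, List.drop_append,
            List.take_of_length_le (l := L.drop idx.toNat) (i := v.toNat) (by simp; omega),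
            List.drop_eq_nil_of_le (as := L.drop idx.toNat) (i := v.toNat) (by simp; omega),
            show v.toNat - (L.drop idx.toNat).length = (idx + v - n).toNat from by simp; omega,
            List.take_left' hQ1len, List.drop_left' hQ1len, List.nil_append]
        rw [hLHS]
        have hRHS : (((L.drop idx.toNat ++ L.take (idx + v - n).toNat).reverse).drop (n - idx).toNat ++
              ((L.take idx.toNat).drop (idx + v - n).toNat ++ ((L.drop idx.toNat ++ L.take (idx + v - n).toNat).reverse).take (n - idx).toNat)).rotate idx.toNat
            = (L.drop idx.toNat ++ L.take (idx + v - n).toNat).reverse ++ (L.take idx.toNat).drop (idx + v - n).toNat := by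
          have hXQ : (((L.drop idx.toNat ++ L.take (idx + v - n).toNat).reverse).drop (n - idx).toNat).length
              + ((L.take idx.toNat).drop (idx + v - n).toNat).length = idx.toNat := by
            simp [hQ1len, List.length_take_of_le hiL]
            omega
          have hwrap := wrap_aux
            (((L.drop idx.toNat ++ L.take (idx + v - n).toNat).reverse).drop (n - idx).toNat)
            (((L.drop idx.toNat ++ L.take (idx + v - n).toNat).reverse).take (n - idx).toNat)
            ((L.take idx.toNat).drop (idx + v - n).toNat)
          rw [hXQ, List.take_append_drop] at hwrap
          rw [List.rotate_eq_drop_append_take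
            (by simp [hQ1len, List.length_take_of_le hiL]; omega), hwrap]
        rw [hRHS]
    · -- non-wrapping branch of A
      rw [if_neg hc]
      rw [PySem.List.slice_to _ hi0, PySem.List.slice_from _ (by omega : (0:Int) ≤ idx + v),
        PySem.List.slice_toNat _ hi0 (by omega : (0:Int) ≤ idx + v)]
      have hit : (idx + v).toNat - idx.toNat = v.toNat := by omega
      have hdd : L.drop (idx + v).toNat = (L.drop idx.toNat).drop v.toNat := by
        rw [List.drop_drop]
        congr 1
        omega
      rw [hit, hdd]
      have hMlen : ((L.drop idx.toNat).take v.toNat).length = v.toNat :=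
        List.length_take_of_le (by simp; omega)
      refine ⟨_, rfl, ?_, ?_⟩
      · simp [hMlen, List.length_take_of_le hiL]
        omega
      · have hstep := rot_step_small (L.take idx.toNat) ((L.drop idx.toNat).take v.toNat)
          ((L.drop idx.toNat).drop v.toNat)
        rw [List.length_take_of_le hiL, hMlen, List.take_append_drop] at hstep
        have hElen' : (L.take idx.toNat ++ ((L.drop idx.toNat).take v.toNat).reverse ++ (L.drop idx.toNat).drop v.toNat).length = L.length := by
          simp [hMlen, List.length_take_of_le hiL]
          omega
        rw [List.rotate_eq_drop_append_take hiL,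
          List.rotate_eq_drop_append_take (by rw [hElen']; exact hiL), hstep]
  obtain ⟨E, hE, hElen, hkey⟩ := main
  have hEi : idx.toNat ≤ E.length := by omega
  have hsE : (PySem.Int.mod (v + skip) n).toNat ≤ (E.rotate idx.toNat).length := by
    rw [List.length_rotate, hElen]; omega
  refine ⟨?_, ?_, ?_, ?_, ?_, ?_⟩
  · show _ = n.toNat
    simp only [stepA]
    rw [hE]; exact hElen
  · exact PySem.Int.mod_nonneg _ hn0
  · exact PySem.Int.mod_lt _ hn0
  · show PySem.List.slice _ (some (PySem.Int.mod (v + skip) n)) none ++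
        PySem.List.slice _ none (some (PySem.Int.mod (v + skip) n)) = _
    simp only [stepA]
    rw [hE]
    rw [PySem.List.slice_to _ hv0, PySem.List.slice_from _ hv0,
      PySem.List.slice_from _ hs0, PySem.List.slice_to _ hs0, hkey,
      ← List.rotate_eq_drop_append_take hsE, List.rotate_rotate]
    have hcast : (PySem.Int.mod (idx + v + skip) n).toNat
        = (idx.toNat + (PySem.Int.mod (v + skip) n).toNat) % E.length := by
      rw [hElen]
      have h1 : PySem.Int.mod (idx + v + skip) n = (idx + v + skip) % n :=
        PySem.Int.mod_eq_emod_of_pos hn0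
      have h2 : (((idx.toNat + (PySem.Int.mod (v + skip) n).toNat) % n.toNat : Nat) : Int)
          = (idx + v + skip) % n := by
        push_cast [hidx, hsInt, hNn]
        rw [PySem.Int.mod_eq_emod_of_pos hn0, emod_add_emod_right, Int.add_assoc]
      omega
    rw [hcast, List.rotate_mod]
  · show PySem.Int.mod (idx + PySem.Int.mod (v + skip) n) n = PySem.Int.mod (idx + v + skip) n
    rw [PySem.Int.mod_eq_emod_of_pos hn0, PySem.Int.mod_eq_emod_of_pos hn0,
      PySem.Int.mod_eq_emod_of_pos hn0, emod_add_emod_right, Int.add_assoc]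
  · rfl

theorem foldl_inv (n : Int) (hn : 2 ≤ n) (L : List Int) :
    ∀ (stA stB : List Int × Int × Int), (∀ v ∈ L, 0 ≤ v ∧ v ≤ n) → KnotInv n stA stB →
      KnotInv n (L.foldl (stepA n) stA) (L.foldl (stepB n) stB) := by
  induction L with
  | nil => intro stA stB _ h; exact h
  | cons v L ih =>
      intro stA stB hb h
      exact ih _ _ (fun x hx => hb x (List.mem_cons_of_mem _ hx))
        (step_inv n v hn (hb v (List.mem_cons_self)).1 (hb v (List.mem_cons_self)).2 _ _ h)

-- reading off the two first elements at the end of both loops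
theorem final_eq (n : Int) (hn : 2 ≤ n) (stA stB : List Int × Int × Int) (h : KnotInv n stA stB) :
    PySem.List.pyGetD stA.1 0 0 * PySem.List.pyGetD stA.1 1 0
      = PySem.List.pyGetD stB.1 (PySem.Int.mod (n - stB.2.1) n) 0 *
        PySem.List.pyGetD stB.1 (PySem.Int.mod (n - stB.2.1 + 1) n) 0 := by
  obtain ⟨L, idx, skip⟩ := stA
  obtain ⟨rot, off, skB⟩ := stB
  obtain ⟨hlen, hi0, hin, hrot, hoff, -⟩ := h
  dsimp only at hlen hi0 hin hrot hoff ⊢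
  subst hrot
  replace hoff := hoff.symm; subst hoff
  have hn0 : (0:Int) < n := by omega
  have hidx : ((idx.toNat : Int)) = idx := Int.toNat_of_nonneg hi0
  have hrl : (L.rotate idx.toNat).length = L.length := List.length_rotate _ _
  rw [PySem.Int.mod_eq_emod_of_pos hn0, PySem.Int.mod_eq_emod_of_pos hn0]
  have hj10 : 0 ≤ (n - idx) % n := Int.emod_nonneg _ (by omega)
  have hj1n : (n - idx) % n < n := Int.emod_lt_of_pos _ hn0
  have hj20 : 0 ≤ (n - idx + 1) % n := Int.emod_nonneg _ (by omega)
  have hj2n : (n - idx + 1) % n < n := Int.emod_lt_of_pos _ hn0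
  rw [PySem.List.pyGetD_eq_getElem L 0 (by norm_num) (by omega),
    PySem.List.pyGetD_eq_getElem L 0 (by norm_num) (by omega),
    PySem.List.pyGetD_eq_getElem _ 0 hj10 (by omega),
    PySem.List.pyGetD_eq_getElem _ 0 hj20 (by omega),
    List.getElem_rotate, List.getElem_rotate]
  have key1 : (((n - idx) % n).toNat + idx.toNat) % L.length = 0 := by
    by_cases h0 : idx = 0
    · subst h0; simp
    · have hj1 : (n - idx) % n = n - idx := Int.emod_eq_of_lt (by omega) (by omega)
      have hsum : ((n - idx) % n).toNat + idx.toNat = L.length := by omega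
      rw [hsum, Nat.mod_self]
  have key2 : (((n - idx + 1) % n).toNat + idx.toNat) % L.length = 1 := by
    by_cases h0 : idx = 0
    · subst h0
      have hj2 : (n - 0 + 1) % n = 1 := by
        rw [show n - 0 + 1 = 1 + n * 1 from by ring, Int.add_mul_emod_self_left]
        exact Int.emod_eq_of_lt (by omega) (by omega)
      rw [hj2]
      simp
      exact Nat.mod_eq_of_lt (by omega)
    · by_cases h1 : idx = 1
      · subst h1
        have hj2 : (n - 1 + 1) % n = 0 := by
          rw [show n - 1 + 1 = n from by ring, Int.emod_self]
        rw [hj2]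
        simp
        exact Nat.mod_eq_of_lt (by omega)
      · have hj2 : (n - idx + 1) % n = n - idx + 1 := Int.emod_eq_of_lt (by omega) (by omega)
        have hsum : ((n - idx + 1) % n).toNat + idx.toNat = L.length + 1 := by omega
        rw [hsum, Nat.add_mod_left]
        exact Nat.mod_eq_of_lt (by omega)
  simp only [Int.toNat_zero, Int.toNat_one, key1, key2]

-- ===== VERDICT (by name: the statement is the Claim_ definition above) =====
theorem solve_line_spec : Claim_equal_solve_line := by
  intro n line _ hpre
  obtain ⟨hn, htok⟩ := hpre
  unfold Spec_solve_line
  simp only [solve_line, solve_line_alt]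
  have hb : ∀ w ∈ ((PySem.Str.split? line ",").getD []).map (fun t => (PySem.Int.ofStr? t).getD 0),
      0 ≤ w ∧ w ≤ n := by
    intro w hw
    obtain ⟨tk, htk, rfl⟩ := List.mem_map.1 hw
    exact ⟨(htok tk htk).2.1, (htok tk htk).2.2⟩
  have hinv0 : KnotInv n (PySem.List.pyRange 0 n 1, 0, 0) (PySem.List.pyRange 0 n 1, 0, 0) := by
    refine ⟨?_, le_refl 0, show (0:Int) < n from by omega, ?_, rfl, rfl⟩
    · rw [PySem.List.length_pyRange_one]
      norm_num
    · simp
  exact final_eq n hn _ _ (foldl_inv n hn _ _ _ hb hinv0)
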